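-- pv_equiv track=rewrite | github.com/xx205/unify_llm_interleave | unify_llm_interleave/common.py | _parse_pages_expr
-- ===== SOURCE A (Python) =====
-- from typing import Dict, List, Optional, Set
--
-- def _parse_pages_expr(expr: Optional[str], page_count: int) -> List[int]:
--     """Parse a pages expression like "0,5-8" into a sorted unique list of 0-based page indices."""
--     if page_count <= 0:
--         return []
--     if not expr:
--         return list(range(page_count))
--     expr = str(expr).strip()
--     if expr.lower() in ('all', '*'):
--         return list(range(page_count))
--     # normalize separators (support Chinese comma)
--     expr = expr.replace('，', ',')
--     parts = [p.strip() for p in expr.split(',') if p.strip()]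
--     out: List[int] = []
--
--     def _add_range(a: int, b: int):
--         lo = max(0, min(a, b))
--         hi = min(page_count - 1, max(a, b))
--         out.extend(range(lo, hi + 1))
--
--     for tok in parts:
--         if '-' in tok:
--             a_str, b_str = tok.split('-', 1)
--             a = 0 if a_str == '' else int(a_str)
--             b = (page_count - 1) if b_str == '' else int(b_str)
--             _add_range(a, b)
--         else:
--             try:
--                 idx = int(tok)
--             except ValueError:
--                 continue
--             idx = max(0, min(page_count - 1, idx))
--             out.append(idx)
--     # unique & sorted
--     return sorted(dict.fromkeys(out))
-- ===== SOURCE B (Python) =====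
-- from typing import List, Optional
--
-- def _parse_pages_expr(expr: Optional[str], page_count: int) -> List[int]:
--     """Collect clamped (lo, hi) intervals, sort by start, merge, and emit each merged
--     run once — no per-page duplicate materialisation, no dedup pass, sort only the tokens."""
--     if page_count <= 0:
--         return []
--     if not expr:
--         return list(range(page_count))
--     expr = str(expr).strip()
--     if expr.lower() in ('all', '*'):
--         return list(range(page_count))
--     ivs = []
--     for tok in expr.replace('，', ',').split(','):
--         tok = tok.strip()
--         if not tok:
--             continue
--         if '-' in tok:
--             a_str, b_str = tok.split('-', 1)
--             a = 0 if a_str == '' else int(a_str)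
--             b = (page_count - 1) if b_str == '' else int(b_str)
--             lo = max(0, min(a, b))
--             hi = min(page_count - 1, max(a, b))
--             if lo <= hi:
--                 ivs.append((lo, hi))
--         else:
--             try:
--                 idx = int(tok)
--             except ValueError:
--                 continue
--             idx = max(0, min(page_count - 1, idx))
--             ivs.append((idx, idx))
--     ivs.sort(key=lambda iv: iv[0])
--     out: List[int] = []
--     cur = None
--     for lo, hi in ivs:
--         if cur is None:
--             cur = (lo, hi)
--         elif lo <= cur[1] + 1:
--             if hi > cur[1]:
--                 cur = (cur[0], hi)
--         else:
--             out.extend(range(cur[0], cur[1] + 1))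
--             cur = (lo, hi)
--     if cur is not None:
--         out.extend(range(cur[0], cur[1] + 1))
--     return out
-- ===== Notes on version B (the rewrite author's own statement) =====
-- stated objective: alternative
-- what changed: B collects each token as a clamped (lo,hi) interval, sorts the k intervals by start, merges overlapping/adjacent ones and emits each merged run once, instead of A's materialising every listed page into one list and then dict.fromkeys-dedup plus full sort of all listed pages.
import Mathlib
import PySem

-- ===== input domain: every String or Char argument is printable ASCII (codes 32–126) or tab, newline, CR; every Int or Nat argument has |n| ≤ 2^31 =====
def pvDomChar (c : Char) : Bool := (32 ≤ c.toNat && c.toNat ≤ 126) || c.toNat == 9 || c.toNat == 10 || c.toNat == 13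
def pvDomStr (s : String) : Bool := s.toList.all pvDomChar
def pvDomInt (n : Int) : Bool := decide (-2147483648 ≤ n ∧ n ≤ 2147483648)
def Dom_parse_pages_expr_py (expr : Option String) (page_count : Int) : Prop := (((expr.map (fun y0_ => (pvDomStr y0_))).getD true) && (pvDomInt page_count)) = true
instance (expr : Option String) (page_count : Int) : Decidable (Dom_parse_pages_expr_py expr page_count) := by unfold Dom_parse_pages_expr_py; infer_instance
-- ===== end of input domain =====

-- B replaces A's extend-every-page / dict.fromkeys / sort pipeline by clamped intervals
-- sorted by start and merged, each merged run emitted once; return value only (no mutation).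

-- ===== PORT A =====
-- tokenization shared verbatim by both Pythons: strip each comma-separated piece, drop empties
def pvParts (e : String) : List String :=
  (((PySem.Str.split? (PySem.Str.replace e "，" ",") ",").getD []).map PySem.Str.strip).filter
    (fun p => !(p == ""))

-- one loop iteration of A: extend `out` with the clamped range, or append the clamped index
-- (Pre_ excludes the inputs where Python's int() raises; `.getD 0` is never reached inside Pre_)
def pvAStep (page_count : Int) (out : List Int) (tok : String) : List Int :=
  if PySem.Str.isIn "-" tok then
    match (PySem.Str.splitMax? tok "-" 1).getD [] with
    | [aStr, bStr] =>
        let a : Int := if aStr == "" then 0 else (PySem.Int.ofStr? aStr).getD 0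
        let b : Int := if bStr == "" then page_count - 1 else (PySem.Int.ofStr? bStr).getD 0
        out ++ PySem.List.pyRange (max 0 (min a b)) (min (page_count - 1) (max a b) + 1) 1
    | _ => out
  else
    match PySem.Int.ofStr? tok with
    | none => out
    | some idx => out ++ [max 0 (min (page_count - 1) idx)]

def parse_pages_expr_py (expr : Option String) (page_count : Int) : List Int :=
  if page_count ≤ 0 then []
  else
    match expr with
    | none => PySem.List.pyRange 0 page_count 1
    | some s =>
      if s == "" then PySem.List.pyRange 0 page_count 1
      else
        let e := PySem.Str.strip s
        if PySem.Str.lower e == "all" || PySem.Str.lower e == "*" then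
          PySem.List.pyRange 0 page_count 1
        else
          PySem.List.sorted (PySem.List.dedup ((pvParts e).foldl (pvAStep page_count) []))
            (fun x => x) false

-- ===== PORT B =====
-- one loop iteration of B: append the clamped interval (lo, hi) — if nonempty — or (idx, idx)
def pvBStep (page_count : Int) (ivs : List (Int × Int)) (tok : String) : List (Int × Int) :=
  if PySem.Str.isIn "-" tok then
    match (PySem.Str.splitMax? tok "-" 1).getD [] with
    | [aStr, bStr] =>
        let a : Int := if aStr == "" then 0 else (PySem.Int.ofStr? aStr).getD 0
        let b : Int := if bStr == "" then page_count - 1 else (PySem.Int.ofStr? bStr).getD 0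
        let lo := max 0 (min a b)
        let hi := min (page_count - 1) (max a b)
        if lo ≤ hi then ivs ++ [(lo, hi)] else ivs
    | _ => ivs
  else
    match PySem.Int.ofStr? tok with
    | none => ivs
    | some idx =>
        ivs ++ [(max 0 (min (page_count - 1) idx), max 0 (min (page_count - 1) idx))]

-- merge loop state: (pages emitted so far, current open interval)
def pvMergeStep (st : List Int × Option (Int × Int)) (p : Int × Int) :
    List Int × Option (Int × Int) :=
  match st.2 with
  | none => (st.1, some p)
  | some (l, u) =>
      if p.1 ≤ u + 1 then
        if u < p.2 then (st.1, some (l, p.2)) else st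
      else (st.1 ++ PySem.List.pyRange l (u + 1) 1, some p)

-- final flush of the open interval
def pvEmit (st : List Int × Option (Int × Int)) : List Int :=
  match st.2 with
  | none => st.1
  | some (l, u) => st.1 ++ PySem.List.pyRange l (u + 1) 1

def parse_pages_expr_py_alt (expr : Option String) (page_count : Int) : List Int :=
  if page_count ≤ 0 then []
  else
    match expr with
    | none => PySem.List.pyRange 0 page_count 1
    | some s =>
      if s == "" then PySem.List.pyRange 0 page_count 1
      else
        let e := PySem.Str.strip s
        if PySem.Str.lower e == "all" || PySem.Str.lower e == "*" then
          PySem.List.pyRange 0 page_count 1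
        else
          let ivs := (pvParts e).foldl (pvBStep page_count) []
          pvEmit ((PySem.List.sorted ivs (fun iv => iv.1) false).foldl pvMergeStep ([], none))

-- ===== PRECONDITION & SPEC =====
-- a token containing '-' is acceptable iff each nonempty side parses as a Python int
def pvTokOk (tok : String) : Bool :=
  !(PySem.Str.isIn "-" tok) ||
  (match (PySem.Str.splitMax? tok "-" 1).getD [] with
   | [aStr, bStr] =>
       (aStr == "" || (PySem.Int.ofStr? aStr).isSome) &&
       (bStr == "" || (PySem.Int.ofStr? bStr).isSome)
   | _ => true)

-- Pre_ excludes exactly the inputs on which Python A raises ValueError: page_count > 0,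
-- a non-trivial expression, and some '-'-token whose nonempty side is not int-parsable
-- (e.g. '1-x'); Python B raises there too.
def pvPreB (expr : Option String) (page_count : Int) : Bool :=
  page_count ≤ 0 ||
  match expr with
  | none => true
  | some s =>
      s == "" || PySem.Str.lower (PySem.Str.strip s) == "all" ||
      PySem.Str.lower (PySem.Str.strip s) == "*" ||
      (pvParts (PySem.Str.strip s)).all pvTokOk

def Pre_parse_pages_expr_py (expr : Option String) (page_count : Int) : Prop :=
  pvPreB expr page_count = true
instance (expr : Option String) (page_count : Int) : Decidable (Pre_parse_pages_expr_py expr page_count) := by unfold Pre_parse_pages_expr_py; infer_instance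

def pvWitness_parse_pages_expr_py : Option String × Int := (some "0, 5-8, -2", 10)

def Spec_parse_pages_expr_py (expr : Option String) (page_count : Int) (out : List Int) : Prop := out = parse_pages_expr_py_alt expr page_count
instance (expr : Option String) (page_count : Int) (out : List Int) : Decidable (Spec_parse_pages_expr_py expr page_count out) := by unfold Spec_parse_pages_expr_py; infer_instance

-- ===== CLAIM (what is proved, stated in full; the proofs are below) =====
def Claim_equal_parse_pages_expr_py : Prop := ∀ (expr : Option String) (page_count : Int), Dom_parse_pages_expr_py expr page_count → Pre_parse_pages_expr_py expr page_count → Spec_parse_pages_expr_py expr page_count (parse_pages_expr_py expr page_count)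

-- ===== LEMMAS AND PROOFS =====

-- one token: B's intervals cover exactly the pages A appends, and stay nonempty
theorem pv_step_inv (pc : Int) (tok : String) (out : List Int) (ivs : List (Int × Int))
    (hm : ∀ x : Int, (∃ p ∈ ivs, p.1 ≤ x ∧ x ≤ p.2) ↔ x ∈ out)
    (hv : ∀ p ∈ ivs, p.1 ≤ p.2) :
    (∀ x : Int, (∃ p ∈ pvBStep pc ivs tok, p.1 ≤ x ∧ x ≤ p.2) ↔ x ∈ pvAStep pc out tok) ∧
    (∀ p ∈ pvBStep pc ivs tok, p.1 ≤ p.2) := by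
  unfold pvAStep pvBStep
  cases hd : PySem.Str.isIn "-" tok
  · simp only [Bool.false_eq_true, if_false]
    cases PySem.Int.ofStr? tok with
    | none => exact ⟨hm, hv⟩
    | some idx =>
        constructor
        · intro x
          simp only [List.mem_append, List.mem_singleton]
          constructor
          · rintro ⟨p, hp | hp, h1, h2⟩
            · exact Or.inl ((hm x).mp ⟨p, hp, h1, h2⟩)
            · subst hp; right; omega
          · rintro (hx | hx)
            · obtain ⟨p, hp, h⟩ := (hm x).mpr hx; exact ⟨p, Or.inl hp, h⟩
            · exact ⟨_, Or.inr rfl, by omega⟩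
        · intro p hp
          rcases List.mem_append.mp hp with hp | hp
          · exact hv p hp
          · simp only [List.mem_singleton] at hp; subst hp; simp
  · simp only [if_true]
    rcases (PySem.Str.splitMax? tok "-" 1).getD [] with _ | ⟨a, _ | ⟨b, _ | _⟩⟩
    case nil => exact ⟨hm, hv⟩
    case cons.nil => exact ⟨hm, hv⟩
    case cons.cons.cons => exact ⟨hm, hv⟩
    case cons.cons.nil =>
      simp only
      generalize (if (a == "") = true then 0 else (PySem.Int.ofStr? a).getD 0) = av
      generalize (if (b == "") = true then pc - 1 else (PySem.Int.ofStr? b).getD 0) = bv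
      by_cases hlh : max 0 (min av bv) ≤ min (pc - 1) (max av bv)
      · simp only [hlh, if_true]
        constructor
        · intro x
          simp only [List.mem_append, List.mem_singleton, PySem.List.mem_pyRange_one]
          constructor
          · rintro ⟨p, hp | hp, h1, h2⟩
            · exact Or.inl ((hm x).mp ⟨p, hp, h1, h2⟩)
            · subst hp; right; simp only at h1 h2; omega
          · rintro (hx | hx)
            · obtain ⟨p, hp, h⟩ := (hm x).mpr hx; exact ⟨p, Or.inl hp, h⟩
            · exact ⟨_, Or.inr rfl, by constructor <;> [exact (by omega); exact (by omega)]⟩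
        · intro p hp
          rcases List.mem_append.mp hp with hp | hp
          · exact hv p hp
          · simp only [List.mem_singleton] at hp; subst hp; simpa using hlh
      · simp only [hlh, if_false]
        rw [PySem.List.pyRange_one_eq_nil (by omega), List.append_nil]
        exact ⟨hm, hv⟩

-- the whole token loop preserves the correspondence
theorem pv_loop_inv (pc : Int) (parts : List String) :
    ∀ (out : List Int) (ivs : List (Int × Int)),
    (∀ x : Int, (∃ p ∈ ivs, p.1 ≤ x ∧ x ≤ p.2) ↔ x ∈ out) → (∀ p ∈ ivs, p.1 ≤ p.2) →
    (∀ x : Int, (∃ p ∈ parts.foldl (pvBStep pc) ivs, p.1 ≤ x ∧ x ≤ p.2) ↔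
        x ∈ parts.foldl (pvAStep pc) out) ∧
    (∀ p ∈ parts.foldl (pvBStep pc) ivs, p.1 ≤ p.2) := by
  induction parts with
  | nil => intro out ivs hm hv; exact ⟨hm, hv⟩
  | cons tok rest ih =>
      intro out ivs hm hv
      obtain ⟨hm', hv'⟩ := pv_step_inv pc tok out ivs hm hv
      exact ih (pvAStep pc out tok) (pvBStep pc ivs tok) hm' hv'

-- merge loop: emits a strictly increasing list covering exactly the processed intervals
theorem pv_merge_inv (rest : List (Int × Int)) :
    ∀ (out : List Int) (l u : Int),
    List.Pairwise (· < ·) out → (∀ x ∈ out, x < l) → l ≤ u →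
    (∀ p ∈ rest, l ≤ p.1) → (∀ p ∈ rest, p.1 ≤ p.2) →
    List.Pairwise (fun p q : Int × Int => p.1 ≤ q.1) rest →
    List.Pairwise (· < ·) (pvEmit (rest.foldl pvMergeStep (out, some (l, u)))) ∧
    (∀ x : Int, x ∈ pvEmit (rest.foldl pvMergeStep (out, some (l, u))) ↔
      (x ∈ out ∨ (l ≤ x ∧ x ≤ u) ∨ ∃ p ∈ rest, p.1 ≤ x ∧ x ≤ p.2)) := by
  induction rest with
  | nil =>
      intro out l u hpw hlt hlu _ _ _
      simp only [List.foldl_nil]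
      constructor
      · show List.Pairwise (· < ·) (pvEmit (out, some (l, u)))
        unfold pvEmit
        refine List.pairwise_append.mpr ⟨hpw, PySem.List.pairwise_lt_pyRange_one l (u + 1), ?_⟩
        intro a ha b hb
        have hb' := PySem.List.mem_pyRange_one.mp hb
        have := hlt a ha
        omega
      · intro x
        show x ∈ pvEmit (out, some (l, u)) ↔ _
        unfold pvEmit
        simp only [List.mem_append, PySem.List.mem_pyRange_one, List.not_mem_nil]
        constructor
        · rintro (hx | hx)
          · exact Or.inl hx
          · right; left; omega
        · rintro (hx | hx | ⟨p, hp, _⟩)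
          · exact Or.inl hx
          · right; omega
          · exact hp.elim
  | cons q rest ih =>
      rintro out l u hpw hlt hlu hge hval hsorted
      obtain ⟨lo, hi⟩ := q
      have hllo : l ≤ lo := hge (lo, hi) (List.mem_cons_self)
      have hlohi : lo ≤ hi := hval (lo, hi) (List.mem_cons_self)
      have hge' : ∀ p ∈ rest, lo ≤ p.1 := fun p hp =>
        (List.pairwise_cons.mp hsorted).1 p hp
      have hval' : ∀ p ∈ rest, p.1 ≤ p.2 := fun p hp => hval p (List.mem_cons_of_mem _ hp)
      have hsorted' := (List.pairwise_cons.mp hsorted).2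
      simp only [List.foldl_cons]
      by_cases h1 : lo ≤ u + 1
      · by_cases h2 : u < hi
        · have hst : pvMergeStep (out, some (l, u)) (lo, hi) = (out, some (l, hi)) := by
            simp [pvMergeStep, h1, h2]
          rw [hst]
          obtain ⟨hA, hB⟩ := ih out l hi hpw hlt (by omega)
            (fun p hp => le_trans hllo (hge' p hp)) hval' hsorted'
          refine ⟨hA, fun x => ?_⟩
          rw [hB x]
          constructor
          · rintro (hx | hx | hx)
            · exact Or.inl hx
            · by_cases hxu : x ≤ u
              · right; left; omega
              · exact Or.inr (Or.inr ⟨(lo, hi), List.mem_cons_self, by omega⟩)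
            · exact Or.inr (Or.inr (hx.imp fun p hp => ⟨List.mem_cons_of_mem _ hp.1, hp.2⟩))
          · rintro (hx | hx | ⟨p, hp, hx⟩)
            · exact Or.inl hx
            · right; left; omega
            · rcases List.mem_cons.mp hp with hp | hp
              · right; left; rw [hp] at hx; simp only at hx; omega
              · exact Or.inr (Or.inr ⟨p, hp, hx⟩)
        · have hst : pvMergeStep (out, some (l, u)) (lo, hi) = (out, some (l, u)) := by
            simp [pvMergeStep, h1, h2]
          rw [hst]
          obtain ⟨hA, hB⟩ := ih out l u hpw hlt hlu
            (fun p hp => le_trans hllo (hge' p hp)) hval' hsorted'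
          refine ⟨hA, fun x => ?_⟩
          rw [hB x]
          constructor
          · rintro (hx | hx | hx)
            · exact Or.inl hx
            · right; left; exact hx
            · exact Or.inr (Or.inr (hx.imp fun p hp => ⟨List.mem_cons_of_mem _ hp.1, hp.2⟩))
          · rintro (hx | hx | ⟨p, hp, hx⟩)
            · exact Or.inl hx
            · right; left; exact hx
            · rcases List.mem_cons.mp hp with hp | hp
              · right; left; rw [hp] at hx; simp only at hx; omega
              · exact Or.inr (Or.inr ⟨p, hp, hx⟩)
      · have hst : pvMergeStep (out, some (l, u)) (lo, hi) =
            (out ++ PySem.List.pyRange l (u + 1) 1, some (lo, hi)) := by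
          simp [pvMergeStep, h1]
        rw [hst]
        have hpw' : List.Pairwise (· < ·) (out ++ PySem.List.pyRange l (u + 1) 1) := by
          refine List.pairwise_append.mpr ⟨hpw, PySem.List.pairwise_lt_pyRange_one l (u + 1), ?_⟩
          intro a ha b hb
          have hb' := PySem.List.mem_pyRange_one.mp hb
          have := hlt a ha
          omega
        have hlt' : ∀ x ∈ out ++ PySem.List.pyRange l (u + 1) 1, x < lo := by
          intro x hx
          rcases List.mem_append.mp hx with hx | hx
          · have := hlt x hx; omega
          · have := PySem.List.mem_pyRange_one.mp hx; omega
        obtain ⟨hA, hB⟩ := ih (out ++ PySem.List.pyRange l (u + 1) 1) lo hi hpw' hlt' hlohi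
          hge' hval' hsorted'
        refine ⟨hA, fun x => ?_⟩
        rw [hB x]
        simp only [List.mem_append, PySem.List.mem_pyRange_one]
        constructor
        · rintro (⟨hx | hx⟩ | hx | hx)
          · exact Or.inl hx
          · right; left; omega
          · exact Or.inr (Or.inr ⟨(lo, hi), List.mem_cons_self, hx⟩)
          · exact Or.inr (Or.inr (hx.imp fun p hp => ⟨List.mem_cons_of_mem _ hp.1, hp.2⟩))
        · rintro (hx | hx | ⟨p, hp, hx⟩)
          · exact Or.inl (Or.inl hx)
          · left; right; omega
          · rcases List.mem_cons.mp hp with hp | hp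
            · right; left; rw [hp] at hx; simpa using hx
            · exact Or.inr (Or.inr ⟨p, hp, hx⟩)

-- a strictly increasing list with the same members as `out` IS sorted(dict.fromkeys(out))
theorem pv_sorted_dedup_eq (out r : List Int) (hr : List.Pairwise (· < ·) r)
    (hm : ∀ x : Int, x ∈ r ↔ x ∈ out) :
    PySem.List.sorted (PySem.List.dedup out) (fun x => x) false = r := by
  have hpermL : (PySem.List.sorted (PySem.List.dedup out) (fun x => x) false).Perm
      (PySem.List.dedup out) := PySem.List.sorted_perm _ _ _
  have hndL : (PySem.List.sorted (PySem.List.dedup out) (fun x => x) false).Nodup :=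
    hpermL.nodup_iff.mpr (PySem.List.nodup_dedup out)
  have hndR : r.Nodup := hr.imp (fun h => ne_of_lt h)
  have hmem : ∀ a : Int, a ∈ PySem.List.sorted (PySem.List.dedup out) (fun x => x) false ↔
      a ∈ r := by
    intro a
    rw [hpermL.mem_iff, PySem.List.mem_dedup, hm a]
  have hperm := (List.perm_ext_iff_of_nodup hndL hndR).mpr hmem
  refine List.Perm.eq_of_pairwise (le := fun a b : Int => a ≤ b)
    (fun a b _ _ h1 h2 => le_antisymm h1 h2) ?_ ?_ hperm
  · exact PySem.List.sorted_pairwise (PySem.List.dedup out) (fun x => x)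
  · exact hr.imp (fun h => le_of_lt h)

-- driving the merge loop from the empty state over any start-sorted interval list T
theorem pv_merge_top (T : List (Int × Int)) (out : List Int)
    (hsorted : List.Pairwise (fun p q : Int × Int => p.1 ≤ q.1) T)
    (hvT : ∀ p ∈ T, p.1 ≤ p.2)
    (hmemT : ∀ x : Int, (∃ p ∈ T, p.1 ≤ x ∧ x ≤ p.2) ↔ x ∈ out) :
    PySem.List.sorted (PySem.List.dedup out) (fun x => x) false =
    pvEmit (T.foldl pvMergeStep ([], none)) := by
  cases T with
  | nil =>
      have hempty : out = [] := by
        rw [List.eq_nil_iff_forall_not_mem]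
        intro x hx
        obtain ⟨p, hp, _⟩ := (hmemT x).mpr hx
        exact absurd hp (List.not_mem_nil)
      rw [hempty]
      simp [pvEmit, PySem.List.dedup, PySem.List.sorted]
  | cons q T' =>
      obtain ⟨l, u⟩ := q
      have hfirst : ((l, u) :: T').foldl pvMergeStep ([], none) =
          T'.foldl pvMergeStep ([], some (l, u)) := by
        simp [pvMergeStep]
      rw [hfirst]
      obtain ⟨hA, hB⟩ := pv_merge_inv T' [] l u (by simp) (by simp)
        (hvT (l, u) (List.mem_cons_self))
        (fun p hp => (List.pairwise_cons.mp hsorted).1 p hp)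
        (fun p hp => hvT p (List.mem_cons_of_mem _ hp))
        (List.pairwise_cons.mp hsorted).2
      refine pv_sorted_dedup_eq out _ hA ?_
      intro x
      rw [hB x, ← hmemT x]
      constructor
      · rintro (hx | hx | ⟨p, hp, h⟩)
        · exact absurd hx (List.not_mem_nil)
        · exact ⟨(l, u), List.mem_cons_self, hx⟩
        · exact ⟨p, List.mem_cons_of_mem _ hp, h⟩
      · rintro ⟨p, hp, h⟩
        rcases List.mem_cons.mp hp with hp | hp
        · right; left; rw [hp] at h; simpa using h
        · exact Or.inr (Or.inr ⟨p, hp, h⟩)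

-- the whole non-trivial branch: A's sort-dedup equals B's sort-merge-emit
theorem pv_branch_eq (pc : Int) (parts : List String) :
    PySem.List.sorted (PySem.List.dedup (parts.foldl (pvAStep pc) [])) (fun x => x) false =
    pvEmit ((PySem.List.sorted (parts.foldl (pvBStep pc) []) (fun iv => iv.1) false).foldl
      pvMergeStep ([], none)) := by
  obtain ⟨hm, hv⟩ := pv_loop_inv pc parts [] [] (by simp) (by simp)
  set ivs := parts.foldl (pvBStep pc) [] with hivs
  set out := parts.foldl (pvAStep pc) [] with hout
  have hperm : (PySem.List.sorted ivs (fun iv => iv.1) false).Perm ivs :=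
    PySem.List.sorted_perm _ _ _
  refine pv_merge_top _ out (PySem.List.sorted_pairwise ivs (fun iv => iv.1))
    (fun p hp => hv p (hperm.mem_iff.mp hp)) ?_
  intro x
  rw [← hm x]
  constructor
  · rintro ⟨p, hp, h⟩; exact ⟨p, hperm.mem_iff.mp hp, h⟩
  · rintro ⟨p, hp, h⟩; exact ⟨p, hperm.mem_iff.mpr hp, h⟩

-- ===== VERDICT (by name: the statement is the Claim_ definition above) =====
theorem parse_pages_expr_py_spec : Claim_equal_parse_pages_expr_py := by
  intro expr page_count _ _
  unfold Spec_parse_pages_expr_py parse_pages_expr_py parse_pages_expr_py_alt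
  by_cases hpc : page_count ≤ 0
  · simp [hpc]
  · simp only [hpc, if_false]
    match expr with
    | none => rfl
    | some s =>
      by_cases hs : s == ""
      · simp [hs]
      · simp only [hs, Bool.false_eq_true, if_false]
        by_cases hall : (PySem.Str.lower (PySem.Str.strip s) == "all"
            || PySem.Str.lower (PySem.Str.strip s) == "*") = true
        · simp [hall]
        · simp only [hall, Bool.false_eq_true, if_false]
          exact pv_branch_eq page_count (pvParts (PySem.Str.strip s))
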